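-- pv_equiv track=rewrite | github.com/aaronyu15/Main_Python | tools/export_integer_params.py | pack_kernel_hex
-- ===== SOURCE A (Python) =====
-- def pack_kernel_hex(kernel_vals, bits_per_weight=8):
--     """Pack 9 kernel weights into one hex line, little-endian.
--
--     kernel_vals: list of 9 signed integers (kH*kW, e.g. 3x3)
--     Little-endian: kernel_vals[0] is the least significant byte.
--     Each weight is two's complement with bits_per_weight bits.
--     """
--     mask = (1 << bits_per_weight) - 1
--     packed = 0
--     for i, w in enumerate(kernel_vals):
--         # Two's complement for negative values
--         if w < 0:
--             w = w + (1 << bits_per_weight)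
--         packed |= (w & mask) << (i * bits_per_weight)
--     n_hex = (len(kernel_vals) * bits_per_weight + 3) // 4
--     return f"{packed:0{n_hex}X}"
-- ===== SOURCE B (Python) =====
-- def pack_kernel_hex(kernel_vals, bits_per_weight=8):
--     """Pack signed kernel weights into one little-endian hex line.
--
--     Emits the hex digits directly from the concatenated little-endian
--     two's-complement bit stream of the weights, never materialising one
--     big packed integer.
--     """
--     bits = []
--     for w in kernel_vals:
--         for j in range(bits_per_weight):
--             bits.append((w >> j) & 1)
--     n_hex = (len(kernel_vals) * bits_per_weight + 3) // 4
--     digits = []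
--     for k in range(n_hex):
--         nib = 0
--         for j in range(4):
--             i = 4 * k + j
--             if i < len(bits):
--                 nib += bits[i] << j
--         digits.append("0123456789ABCDEF"[nib])
--     return "".join(reversed(digits)) or "0"
-- ===== Notes on version B (the rewrite author's own statement) =====
-- stated objective: alternative
-- what changed: B never builds one big packed integer: it flattens the weights' two's-complement residues into a little-endian bit list and emits each hex digit directly from its 4-bit group of that stream, whereas A ORs shifted words into a single big int and hex-formats it with an f-string.
import Mathlib
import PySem

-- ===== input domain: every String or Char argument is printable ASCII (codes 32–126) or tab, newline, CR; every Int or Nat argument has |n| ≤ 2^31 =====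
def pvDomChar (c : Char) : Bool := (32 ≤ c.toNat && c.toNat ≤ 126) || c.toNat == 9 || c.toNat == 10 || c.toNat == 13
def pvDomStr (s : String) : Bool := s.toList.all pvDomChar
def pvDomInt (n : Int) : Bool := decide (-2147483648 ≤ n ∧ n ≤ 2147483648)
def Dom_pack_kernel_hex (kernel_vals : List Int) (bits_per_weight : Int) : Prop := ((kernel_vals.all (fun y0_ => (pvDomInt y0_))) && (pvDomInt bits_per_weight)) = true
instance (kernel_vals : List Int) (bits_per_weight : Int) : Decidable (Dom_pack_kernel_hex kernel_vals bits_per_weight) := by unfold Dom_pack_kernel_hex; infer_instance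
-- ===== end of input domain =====

-- B emits the hex digits directly from the flattened little-endian bit stream of the weights'
-- two's-complement residues, instead of OR-ing shifted words into one big packed integer
-- that is then hex-formatted (alternative algorithm, same order of cost).

-- Shared helper: exact port of the f-string  f"{v:0{width}X}"  for a nonnegative v
-- (uppercase hex digits, zero-padded on the left to `width`; Python prints at least "0").
def pvHexChar (d : Nat) : Char :=
  if d < 10 then Char.ofNat (48 + d) else Char.ofNat (55 + d)

-- hex digits of n, least significant first ([] for 0)
def pvHexDigits (n : Nat) : List Char :=
  if h : n = 0 then [] else pvHexChar (n % 16) :: pvHexDigits (n / 16)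
  decreasing_by exact Nat.div_lt_self (Nat.pos_of_ne_zero h) (by norm_num)

def pvHexFmt (v : Int) (width : Int) : String :=
  let ds := if v.toNat = 0 then ['0'] else pvHexDigits v.toNat
  String.ofList ((List.replicate (width.toNat - ds.length) '0' ++ ds.reverse))

-- ===== PORT A =====
-- Python `x | y`, `x & y` are Int.lor / Int.land; `x << k` (k ≥ 0; a negative shift count
-- raises ValueError and is excluded by Pre_) is rendered exactly as multiplication by 2 ^ k.toNat.
def pack_kernel_hex (kernel_vals : List Int) (bits_per_weight : Int) : String :=
  let mask : Int := 2 ^ bits_per_weight.toNat - 1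
  let packed : Int :=
    (PySem.List.enumerate kernel_vals).foldl
      (fun packed iw =>
        let w := if iw.2 < 0 then iw.2 + 2 ^ bits_per_weight.toNat else iw.2
        Int.lor packed ((Int.land w mask) * 2 ^ (iw.1 * bits_per_weight).toNat))
      0
  let n_hex : Int := PySem.Int.floordiv ((kernel_vals.length : Int) * bits_per_weight + 3) 4
  pvHexFmt packed n_hex

-- ===== PORT B =====
-- Source B: flatten the weights into a little-endian bit list (`bits.append((w >> j) & 1)`;
-- Python's `>>` on an int is floor division by 2^j), then emit each hex digit from its
-- 4-bit group; `"".join(reversed(digits)) or "0"` is the final if-else.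
def pack_kernel_hex_alt (kernel_vals : List Int) (bits_per_weight : Int) : String :=
  let bits : List Int :=
    kernel_vals.foldl
      (fun bits w =>
        (PySem.List.pyRange 0 bits_per_weight 1).foldl
          (fun bits j => bits ++ [Int.land (PySem.Int.floordiv w (2 ^ j.toNat)) 1])
          bits)
      []
  let n_hex : Int := PySem.Int.floordiv ((kernel_vals.length : Int) * bits_per_weight + 3) 4
  let digits : List Char :=
    (PySem.List.pyRange 0 n_hex 1).foldl
      (fun digits k =>
        let nib : Int :=
          (PySem.List.pyRange 0 4 1).foldl
            (fun nib j =>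
              if 4 * k + j < (bits.length : Int)
              then nib + PySem.List.pyGetD bits (4 * k + j) 0 * 2 ^ j.toNat
              else nib)
            0
        digits ++ ["0123456789ABCDEF".toList.getD nib.toNat '?'])
      []
  if digits.isEmpty then "0" else String.ofList digits.reverse

-- ===== PRECONDITION & SPEC =====
-- Python raises ValueError ("negative shift count") when bits_per_weight < 0 (the shift
-- `1 << bits_per_weight` runs before anything else); Pre_ excludes exactly those inputs.
def Pre_pack_kernel_hex (kernel_vals : List Int) (bits_per_weight : Int) : Prop :=
  0 ≤ bits_per_weight
instance (kernel_vals : List Int) (bits_per_weight : Int) : Decidable (Pre_pack_kernel_hex kernel_vals bits_per_weight) := by unfold Pre_pack_kernel_hex; infer_instance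

def pvWitness_pack_kernel_hex : List Int × Int := ([1, -2, 3], 8)

def Spec_pack_kernel_hex (kernel_vals : List Int) (bits_per_weight : Int) (out : String) : Prop := out = pack_kernel_hex_alt kernel_vals bits_per_weight
instance (kernel_vals : List Int) (bits_per_weight : Int) (out : String) : Decidable (Spec_pack_kernel_hex kernel_vals bits_per_weight out) := by unfold Spec_pack_kernel_hex; infer_instance

-- ===== CLAIM (what is proved, stated in full; the proofs are below) =====
def Claim_equal_pack_kernel_hex : Prop := ∀ (kernel_vals : List Int) (bits_per_weight : Int), Dom_pack_kernel_hex kernel_vals bits_per_weight → Pre_pack_kernel_hex kernel_vals bits_per_weight → Spec_pack_kernel_hex kernel_vals bits_per_weight (pack_kernel_hex kernel_vals bits_per_weight)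

-- ===== LEMMAS AND PROOFS =====

-- the two's-complement digit both programs extract from a weight
def pvDigit (bn : Nat) (w : Int) : Int :=
  Int.land (if w < 0 then w + 2 ^ bn else w) (2 ^ bn - 1)

-- the common little-endian base-2^bn value of the digit list
def pvVal (bn : Nat) : List Int → Int
  | [] => 0
  | w :: t => pvVal bn t * 2 ^ bn + pvDigit bn w

-- bit i of N, as an Int
def pvBit (N : Nat) (i : Nat) : Int := ((N / 2 ^ i) % 2 : Nat)

theorem pv_ldiff_le (n m : Nat) : Nat.ldiff n m ≤ n := by
  induction n using Nat.binaryRec generalizing m with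
  | zero => simp [Nat.ldiff]
  | bit b n ih =>
      rw [← Nat.bit_testBit_zero_shiftRight_one m, Nat.ldiff_bit]
      have := ih (m >>> 1)
      rw [Nat.bit_val, Nat.bit_val]
      cases b <;> cases m.testBit 0 <;> simp <;> omega

theorem pv_land_natCast_nonneg_le (x : Int) (m : Nat) :
    0 ≤ Int.land x (m : Int) ∧ Int.land x (m : Int) ≤ (m : Int) := by
  cases x with
  | ofNat a =>
      have : Int.land (Int.ofNat a) (m : Int) = ((a &&& m : Nat) : Int) := rfl
      rw [this]
      exact ⟨Int.natCast_nonneg _, by exact_mod_cast Nat.and_le_right⟩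
  | negSucc a =>
      have : Int.land (Int.negSucc a) (m : Int) = ((Nat.ldiff m a : Nat) : Int) := rfl
      rw [this]
      refine ⟨Int.natCast_nonneg _, ?_⟩
      exact_mod_cast pv_ldiff_le m a

theorem pvDigit_nonneg (bn : Nat) (w : Int) : 0 ≤ pvDigit bn w := by
  have h := pv_land_natCast_nonneg_le (if w < 0 then w + 2 ^ bn else w) (2 ^ bn - 1)
  have hc : ((2 ^ bn - 1 : Nat) : Int) = 2 ^ bn - 1 := by
    push_cast [Nat.one_le_two_pow]; ring
  unfold pvDigit; rw [← hc]; exact h.1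

theorem pvDigit_lt (bn : Nat) (w : Int) : pvDigit bn w < 2 ^ bn := by
  have h := pv_land_natCast_nonneg_le (if w < 0 then w + 2 ^ bn else w) (2 ^ bn - 1)
  have hc : ((2 ^ bn - 1 : Nat) : Int) = 2 ^ bn - 1 := by
    push_cast [Nat.one_le_two_pow]; ring
  have := h.2; rw [hc] at this
  unfold pvDigit; rw [← hc] at this ⊢; omega

-- disjoint OR is addition (Nat): the low k bits of a * 2^k are clear
theorem pv_nat_lor_disjoint : ∀ (k a b : Nat), b < 2 ^ k → (a * 2 ^ k) ||| b = a * 2 ^ k + b := by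
  intro k
  induction k with
  | zero => intro a b hb; (interval_cases b; simp)
  | succ k ih =>
      intro a b hb
      have hb2 : b / 2 < 2 ^ k := by omega
      have h1 : a * 2 ^ (k + 1) = Nat.bit false (a * 2 ^ k) := by
        simp [Nat.bit_val]; ring
      have h2 : b = Nat.bit (b % 2 == 1) (b / 2) := by
        rcases Nat.mod_two_eq_zero_or_one b with h | h <;> (simp [Nat.bit_val, h]; omega)
      rw [h1, h2, Nat.lor_bit, ih a (b / 2) hb2]
      rcases Nat.mod_two_eq_zero_or_one b with h | h <;> (simp [Nat.bit_val, h]; ring_nf)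

-- the Int version, oriented as A's loop uses it
theorem pv_int_lor_disjoint' (k : Nat) (a b : Int) (ha : 0 ≤ a) (hb0 : 0 ≤ b) (hb : b < 2 ^ k) :
    Int.lor b (a * 2 ^ k) = a * 2 ^ k + b := by
  obtain ⟨m, rfl⟩ := Int.eq_ofNat_of_zero_le ha
  obtain ⟨n, rfl⟩ := Int.eq_ofNat_of_zero_le hb0
  have hcast : ((m : Nat) : Int) * 2 ^ k = ((m * 2 ^ k : Nat) : Int) := by push_cast; ring
  rw [hcast]
  have hn : n < 2 ^ k := by exact_mod_cast (by push_cast at hb ⊢; exact hb : (n : Int) < ((2 ^ k : Nat) : Int))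
  have : Int.lor ((n : Nat) : Int) ((m * 2 ^ k : Nat) : Int) = ((n ||| (m * 2 ^ k) : Nat) : Int) := rfl
  rw [this, Nat.lor_comm, pv_nat_lor_disjoint k m n hn]
  push_cast; ring

theorem pvVal_nonneg (bn : Nat) (l : List Int) : 0 ≤ pvVal bn l := by
  induction l with
  | nil => simp [pvVal]
  | cons w t ih =>
      have hd := pvDigit_nonneg bn w
      have : (0:Int) ≤ pvVal bn t * 2 ^ bn := mul_nonneg ih (by positivity)
      simp only [pvVal]; omega

theorem pvVal_lt (bn : Nat) (l : List Int) : pvVal bn l < 2 ^ (l.length * bn) := by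
  induction l with
  | nil => simp [pvVal]
  | cons w t ih =>
      have hd := pvDigit_lt bn w
      have h1 : pvVal bn t * 2 ^ bn ≤ (2 ^ (t.length * bn) - 1) * 2 ^ bn :=
        mul_le_mul_of_nonneg_right (by omega) (by positivity)
      have h2 : ((2:Int) ^ (t.length * bn) - 1) * 2 ^ bn + 2 ^ bn = 2 ^ ((t.length + 1) * bn) := by
        rw [add_mul, one_mul, pow_add]; ring
      simp only [pvVal, List.length_cons]
      omega

-- ((j : Int) * b).toNat = j * b.toNat  (the exponent A computes per element)
theorem pv_toNat_mul (j : Nat) (b : Int) : ((j : Int) * b).toNat = j * b.toNat := by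
  rcases Int.lt_or_le b 0 with hb | hb
  · have h1 : (j : Int) * b ≤ 0 := mul_nonpos_of_nonneg_of_nonpos (by positivity) (le_of_lt hb)
    have h2 : b.toNat = 0 := Int.toNat_of_nonpos (le_of_lt hb)
    rw [Int.toNat_of_nonpos h1, h2, Nat.mul_zero]
  · obtain ⟨bn, rfl⟩ := Int.eq_ofNat_of_zero_le hb
    have h : ((j : Int)) * ((bn : Nat) : Int) = ((j * bn : Nat) : Int) := by push_cast; ring
    rw [h, Int.toNat_natCast, Int.toNat_natCast]

-- A's loop: OR-ing disjoint positioned digits totals acc + 2^(j*bn) * value of the rest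
theorem pv_A_loop (b : Int) (t : List Int) (j : Nat) (acc : Int)
    (h0 : 0 ≤ acc) (hlt : acc < 2 ^ (j * b.toNat)) :
    (PySem.List.enumerate t (j : Int)).foldl
      (fun packed iw =>
        let w := if iw.2 < 0 then iw.2 + 2 ^ b.toNat else iw.2
        Int.lor packed ((Int.land w (2 ^ b.toNat - 1)) * 2 ^ (iw.1 * b).toNat))
      acc
    = acc + 2 ^ (j * b.toNat) * pvVal b.toNat t := by
  induction t generalizing j acc with
  | nil => simp [PySem.List.enumerate_nil, pvVal]
  | cons w t ih =>
      rw [PySem.List.enumerate_cons, List.foldl_cons]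
      have hd0 : 0 ≤ pvDigit b.toNat w := pvDigit_nonneg b.toNat w
      have hdlt : pvDigit b.toNat w < 2 ^ b.toNat := pvDigit_lt b.toNat w
      have hstep :
          Int.lor acc ((Int.land (if w < 0 then w + 2 ^ b.toNat else w) (2 ^ b.toNat - 1))
              * 2 ^ (((j : Int)) * b).toNat)
            = pvDigit b.toNat w * 2 ^ (j * b.toNat) + acc := by
        rw [pv_toNat_mul j b]
        exact pv_int_lor_disjoint' (j * b.toNat) (pvDigit b.toNat w) acc hd0 h0 hlt
      have hacc' : 0 ≤ pvDigit b.toNat w * 2 ^ (j * b.toNat) + acc := by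
        have : (0:Int) ≤ pvDigit b.toNat w * 2 ^ (j * b.toNat) := mul_nonneg hd0 (by positivity)
        omega
      have hacc'lt : pvDigit b.toNat w * 2 ^ (j * b.toNat) + acc < 2 ^ ((j + 1) * b.toNat) := by
        have h1 : pvDigit b.toNat w * 2 ^ (j * b.toNat) ≤ (2 ^ b.toNat - 1) * 2 ^ (j * b.toNat) :=
          mul_le_mul_of_nonneg_right (by omega) (by positivity)
        have h2 : ((2:Int) ^ b.toNat - 1) * 2 ^ (j * b.toNat) + 2 ^ (j * b.toNat)
            = 2 ^ ((j + 1) * b.toNat) := by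
          rw [add_mul, one_mul, pow_add]; ring
        omega
      have hjc : ((j : Int)) + 1 = ((j + 1 : Nat) : Int) := by push_cast; ring
      simp only [hstep]
      rw [hjc, ih (j + 1) _ hacc' hacc'lt]
      simp only [pvVal]
      have : (2:Int) ^ ((j + 1) * b.toNat) = 2 ^ (j * b.toNat) * 2 ^ b.toNat := by
        rw [← pow_add]; ring_nf
      rw [this]; ring

-- A's port equals pvHexFmt of the common value
theorem pv_A_eq (bn : Nat) (l : List Int) :
    pack_kernel_hex l (bn : Int)
      = pvHexFmt (pvVal bn l) (PySem.Int.floordiv ((l.length : Int) * (bn : Int) + 3) 4) := by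
  unfold pack_kernel_hex
  have hA := pv_A_loop (bn : Int) l 0 0 (le_refl 0) (by positivity)
  simp only [Int.toNat_natCast] at hA ⊢
  simp only [Nat.cast_zero, Nat.zero_mul, pow_zero, zero_add, one_mul] at hA
  rw [hA]

-- ===== B-side: the bit-stream characterisation =====

-- Nat.ldiff with an all-ones mask is the complement modulo 2^n
theorem pv_ldiff_mask (n : Nat) : ∀ a : Nat, Nat.ldiff (2 ^ n - 1) a = 2 ^ n - 1 - a % 2 ^ n := by
  induction n with
  | zero => intro a; simp [Nat.ldiff]
  | succ n ih =>
      intro a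
      have hpow : 2 ^ (n + 1) = 2 * 2 ^ n := by rw [pow_succ]; ring
      have h2 : 1 ≤ 2 ^ n := Nat.one_le_two_pow
      have h1 : 2 ^ (n + 1) - 1 = Nat.bit true (2 ^ n - 1) := by
        rw [Nat.bit_val, Bool.toNat_true]; omega
      rw [h1, ← Nat.bit_testBit_zero_shiftRight_one a, Nat.ldiff_bit, ih]
      set b := a.testBit 0 with hb
      set q := a >>> 1 with hq
      have hql : q % 2 ^ n < 2 ^ n := Nat.mod_lt _ (by positivity)
      have hmod : (Nat.bit b q) % 2 ^ (n + 1) = 2 * (q % 2 ^ n) + b.toNat := by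
        have hq2 := Nat.mod_add_div q (2 ^ n)
        have hprod : 2 ^ (n + 1) * (q / 2 ^ n) = 2 * (2 ^ n * (q / 2 ^ n)) := by
          rw [hpow]; ring
        have hlt : 2 * (q % 2 ^ n) + b.toNat < 2 ^ (n + 1) := by
          cases b <;> simp <;> omega
        have hdec : Nat.bit b q = (2 * (q % 2 ^ n) + b.toNat) + 2 ^ (n + 1) * (q / 2 ^ n) := by
          rw [Nat.bit_val]; omega
        rw [hdec, Nat.add_mul_mod_self_left, Nat.mod_eq_of_lt hlt]
      rw [hmod, Nat.bit_val]
      cases b <;> simp <;> omega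

-- Int.land with an all-ones mask is the Python residue  x % 2^n
theorem pv_land_mask (x : Int) (n : Nat) : Int.land x ((2:Int) ^ n - 1) = x % ((2:Int) ^ n) := by
  have hc : ((2 ^ n - 1 : Nat) : Int) = (2:Int) ^ n - 1 := by
    push_cast [Nat.one_le_two_pow]; ring
  rw [← hc]
  cases x with
  | ofNat a =>
      have h : Int.land (Int.ofNat a) ((2 ^ n - 1 : Nat) : Int) = ((a &&& (2 ^ n - 1) : Nat) : Int) := rfl
      rw [h, Nat.and_two_pow_sub_one_eq_mod]
      show ((a % 2 ^ n : Nat) : Int) = ((a : Nat) : Int) % (2:Int) ^ n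
      have hcast : ((2:Int) ^ n) = ((2 ^ n : Nat) : Int) := by push_cast; ring
      rw [hcast]
      norm_cast
  | negSucc a =>
      have h : Int.land (Int.negSucc a) ((2 ^ n - 1 : Nat) : Int)
          = ((Nat.ldiff (2 ^ n - 1) a : Nat) : Int) := rfl
      rw [h, pv_ldiff_mask]
      have hr : a % 2 ^ n < 2 ^ n := Nat.mod_lt _ (by positivity)
      have h2 : 1 ≤ 2 ^ n := Nat.one_le_two_pow
      have hmd : ((a % 2 ^ n : Nat) : Int) + ((2:Int) ^ n) * ((a / 2 ^ n : Nat) : Int) = (a : Int) := by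
        have := Nat.mod_add_div a (2 ^ n)
        push_cast
        exact_mod_cast (by exact_mod_cast this : ((a % 2 ^ n + 2 ^ n * (a / 2 ^ n) : Nat) : Int) = (a : Int))
      have key : Int.negSucc a
          = ((2 ^ n - 1 - a % 2 ^ n : Nat) : Int) + ((2:Int) ^ n) * (-(((a / 2 ^ n : Nat) : Int)) - 1) := by
        rw [Int.negSucc_eq]
        have hcs : ((2 ^ n - 1 - a % 2 ^ n : Nat) : Int) = (2:Int) ^ n - 1 - ((a % 2 ^ n : Nat) : Int) := by
          have hle : 1 + a % 2 ^ n ≤ 2 ^ n := by omega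
          rw [Nat.sub_sub, Nat.cast_sub hle]
          push_cast; ring
        rw [hcs]
        have hprod : ((2:Int) ^ n) * (-(((a / 2 ^ n : Nat) : Int)) - 1)
            = -(((2:Int) ^ n) * ((a / 2 ^ n : Nat) : Int)) - (2:Int) ^ n := by ring
        rw [hprod]
        linarith [hmd]
      rw [key, Int.add_mul_emod_self_left]
      refine (Int.emod_eq_of_lt (Int.natCast_nonneg _) ?_).symm
      have hlt : 2 ^ n - 1 - a % 2 ^ n < 2 ^ n := by omega
      calc ((2 ^ n - 1 - a % 2 ^ n : Nat) : Int) < ((2 ^ n : Nat) : Int) := by exact_mod_cast hlt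
        _ = (2:Int) ^ n := by push_cast; ring

-- the residue  w mod 2^bn  equals the digit A extracts
theorem pv_emod_eq_digit (bn : Nat) (w : Int) :
    w % ((2:Int) ^ bn) = pvDigit bn w := by
  unfold pvDigit
  rw [pv_land_mask]
  split_ifs with h
  · have : w + (2:Int) ^ bn = w + ((2:Int) ^ bn) * 1 := by ring
    rw [this, Int.add_mul_emod_self_left]
  · rfl

-- Python's  (w >> k) & 1  for k < bn is bit k of the weight's two's-complement digit
theorem pv_wbit (bn k : Nat) (hk : k < bn) (w : Int) :
    Int.land (PySem.Int.floordiv w ((2:Int) ^ k)) 1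
      = (((pvDigit bn w).toNat / 2 ^ k % 2 : Nat) : Int) := by
  have hland1 : ∀ x : Int, Int.land x 1 = x % 2 := by
    intro x
    have h := pv_land_mask x 1
    norm_num at h
    exact h
  rw [PySem.Int.floordiv_eq_ediv_of_pos (by positivity), hland1]
  obtain ⟨D, hD⟩ := Int.eq_ofNat_of_zero_le
    (Int.emod_nonneg w (by positivity : ((2:Int) ^ bn) ≠ 0))
  have hDdig : (pvDigit bn w).toNat = D := by
    rw [← pv_emod_eq_digit bn w, hD, Int.toNat_natCast]
  rw [hDdig]
  have hw : w = (D : Int) + ((2:Int) ^ bn) * (w / ((2:Int) ^ bn)) := by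
    have h := Int.emod_add_ediv w ((2:Int) ^ bn)
    rw [hD] at h
    linarith
  have hbk : ((2:Int) ^ bn) * (w / ((2:Int) ^ bn))
      = (2 * ((2:Int) ^ (bn - k - 1) * (w / ((2:Int) ^ bn)))) * (2:Int) ^ k := by
    have : (2:Int) ^ bn = 2 * (2:Int) ^ (bn - k - 1) * (2:Int) ^ k := by
      rw [← pow_succ', ← pow_add]
      congr 1
      omega
    rw [this]; ring
  rw [hw, hbk, Int.add_mul_ediv_right _ _ (by positivity : ((2:Int) ^ k) ≠ 0)]
  rw [Int.add_mul_emod_self_left]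
  have hdivcast : (D : Int) / (2:Int) ^ k = ((D / 2 ^ k : Nat) : Int) := by
    have : ((2:Int) ^ k) = ((2 ^ k : Nat) : Int) := by push_cast; ring
    rw [this]
    exact (Int.natCast_ediv D (2 ^ k)).symm
  rw [hdivcast]
  norm_cast

-- the flattened bit list is the binary expansion of the common value
theorem pv_flatbits (bn : Nat) (l : List Int) :
    l.flatMap (fun w => (List.range bn).map
        (fun k => Int.land (PySem.Int.floordiv w ((2:Int) ^ k)) 1))
      = (List.range (l.length * bn)).map (pvBit (pvVal bn l).toNat) := by
  induction l with
  | nil => simp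
  | cons w t ih =>
      obtain ⟨D, hD⟩ := Int.eq_ofNat_of_zero_le (pvDigit_nonneg bn w)
      obtain ⟨Nt, hNt⟩ := Int.eq_ofNat_of_zero_le (pvVal_nonneg bn t)
      have hDlt : D < 2 ^ bn := by
        have h' := pvDigit_lt bn w; rw [hD] at h'
        exact_mod_cast h'
      have hN : (pvVal bn (w :: t)).toNat = Nt * 2 ^ bn + D := by
        have : pvVal bn (w :: t) = ((Nt * 2 ^ bn + D : Nat) : Int) := by
          simp only [pvVal, hD, hNt]; push_cast; ring
        rw [this, Int.toNat_natCast]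
      have hNt' : (pvVal bn t).toNat = Nt := by rw [hNt, Int.toNat_natCast]
      have hlen : (w :: t).length * bn = bn + t.length * bn := by
        simp [List.length_cons]; ring
      rw [List.flatMap_cons, ih, hN, hNt', hlen, List.range_add, List.map_append, List.map_map]
      congr 1
      · -- the first bn bits are the bits of this weight's digit
        refine List.map_congr_left ?_
        intro k hk
        have hkbn : k < bn := List.mem_range.mp hk
        rw [pv_wbit bn k hkbn w, hD, Int.toNat_natCast]
        -- pvBit (Nt * 2^bn + D) k = (D / 2^k) % 2
        unfold pvBit
        have hsplit : (Nt * 2 ^ bn + D) / 2 ^ k = 2 * (Nt * 2 ^ (bn - k - 1)) + D / 2 ^ k := by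
          have hbk : 2 ^ bn = (2 * 2 ^ (bn - k - 1)) * 2 ^ k := by
            rw [← pow_succ']
            rw [← pow_add]
            congr 1
            omega
          rw [hbk]
          have : Nt * (2 * 2 ^ (bn - k - 1) * 2 ^ k) + D
              = D + (Nt * (2 * 2 ^ (bn - k - 1))) * 2 ^ k := by ring
          rw [this, Nat.add_mul_div_right _ _ (by positivity)]
          ring
        rw [hsplit]
        congr 1
        omega
      · -- the remaining bits are the bits of the tail's value
        refine List.map_congr_left ?_
        intro x _
        show pvBit Nt x = pvBit (Nt * 2 ^ bn + D) (bn + x)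
        unfold pvBit
        have hdiv0 : (Nt * 2 ^ bn + D) / 2 ^ bn = Nt := by
          have : Nt * 2 ^ bn + D = D + Nt * 2 ^ bn := by ring
          rw [this, Nat.add_mul_div_right _ _ (by positivity), Nat.div_eq_of_lt hDlt]
          ring
        have hdiv : (Nt * 2 ^ bn + D) / 2 ^ (bn + x) = Nt / 2 ^ x := by
          rw [pow_add, ← Nat.div_div_eq_div_mul, hdiv0]
        rw [hdiv]

-- the port's bit-building loop produces exactly that bit list
theorem pv_bits (bn : Nat) (l : List Int) :
    l.foldl
      (fun bits w =>
        (PySem.List.pyRange 0 (bn : Int) 1).foldl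
          (fun bits j => bits ++ [Int.land (PySem.Int.floordiv w ((2:Int) ^ j.toNat)) 1])
          bits)
      []
    = (List.range (l.length * bn)).map (pvBit (pvVal bn l).toNat) := by
  have hrange : PySem.List.pyRange 0 (bn : Int) 1 = (List.range bn).map (fun k => ((k : Nat) : Int)) := by
    rw [PySem.List.pyRange_one]; simp
  have hstep : (fun (bits : List Int) (w : Int) =>
        (PySem.List.pyRange 0 (bn : Int) 1).foldl
          (fun bits j => bits ++ [Int.land (PySem.Int.floordiv w ((2:Int) ^ j.toNat)) 1])
          bits)
      = (fun bits w => bits ++ (List.range bn).map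
          (fun k => Int.land (PySem.Int.floordiv w ((2:Int) ^ k)) 1)) := by
    funext bits w
    rw [hrange, List.foldl_map, PySem.List.foldl_append_singleton_eq_map]
    simp
  rw [hstep, PySem.List.foldl_append_eq_flatMap, List.nil_append, pv_flatbits]

-- one guarded nibble term
theorem pv_term (L N : Nat) (hN : N < 2 ^ L) (i : Nat) (x c : Int) :
    (if (i : Int) < (L : Int)
     then x + PySem.List.pyGetD ((List.range L).map (pvBit N)) ((i : Int)) 0 * c
     else x)
    = x + pvBit N i * c := by
  split_ifs with h
  · have hi : i < L := by exact_mod_cast h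
    rw [PySem.List.pyGetD_natCast, PySem.List.getD_map_range _ _ _ _ hi]
  · have hi : L ≤ i := by exact_mod_cast not_lt.mp h
    have h0 : N / 2 ^ i = 0 :=
      Nat.div_eq_of_lt (lt_of_lt_of_le hN (Nat.pow_le_pow_right (by norm_num) hi))
    unfold pvBit
    rw [h0]
    simp

-- the 4-bit group value in Nat
theorem pv_nib_val (N k : Nat) :
    N / 2 ^ (4 * k) % 2 + N / 2 ^ (4 * k + 1) % 2 * 2 + N / 2 ^ (4 * k + 2) % 2 * 4
      + N / 2 ^ (4 * k + 3) % 2 * 8 = N / 16 ^ k % 16 := by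
  have e : ∀ j, N / 2 ^ (4 * k + j) = N / 2 ^ (4 * k) / 2 ^ j := by
    intro j; rw [pow_add, ← Nat.div_div_eq_div_mul]
  have h16 : (16:Nat) ^ k = 2 ^ (4 * k) := by
    rw [pow_mul]; norm_num
  rw [e 1, e 2, e 3, h16]
  set M := N / 2 ^ (4 * k)
  omega

-- the inner j-loop computes the k-th hex digit of N
theorem pv_nib (L N : Nat) (hN : N < 2 ^ L) (k : Nat) :
    (PySem.List.pyRange 0 4 1).foldl
      (fun nib j =>
        if 4 * ((k : Nat) : Int) + j < ((((List.range L).map (pvBit N)).length : Nat) : Int)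
        then nib + PySem.List.pyGetD ((List.range L).map (pvBit N)) (4 * ((k : Nat) : Int) + j) 0 * 2 ^ j.toNat
        else nib)
      0
    = ((N / 16 ^ k % 16 : Nat) : Int) := by
  have hlen : (((List.range L).map (pvBit N)).length : Int) = (L : Int) := by simp
  have hr4 : PySem.List.pyRange 0 4 1 = [0, 1, 2, 3] := by decide
  rw [hr4]
  simp only [List.foldl_cons, List.foldl_nil, hlen]
  have h0 : 4 * ((k : Nat) : Int) + 0 = ((4 * k : Nat) : Int) := by push_cast; ring
  have h1 : 4 * ((k : Nat) : Int) + 1 = ((4 * k + 1 : Nat) : Int) := by push_cast; ring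
  have h2 : 4 * ((k : Nat) : Int) + 2 = ((4 * k + 2 : Nat) : Int) := by push_cast; ring
  have h3 : 4 * ((k : Nat) : Int) + 3 = ((4 * k + 3 : Nat) : Int) := by push_cast; ring
  rw [h0, h1, h2, h3]
  rw [pv_term L N hN (4 * k), pv_term L N hN (4 * k + 1), pv_term L N hN (4 * k + 2),
    pv_term L N hN (4 * k + 3)]
  have hc : ((0:Int)).toNat = 0 ∧ ((1:Int)).toNat = 1 ∧ ((2:Int)).toNat = 2 ∧ ((3:Int)).toNat = 3 := by decide
  rw [hc.1, hc.2.1, hc.2.2.1, hc.2.2.2]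
  unfold pvBit
  rw [← pv_nib_val N k]
  push_cast
  ring

-- the hex alphabet lookup is pvHexChar
theorem pv_hexchar_eq (m : Nat) (hm : m < 16) :
    "0123456789ABCDEF".toList.getD m '?' = pvHexChar m := by
  interval_cases m <;> decide

-- little-endian padded digit list of N
def pvHexLE (N n : Nat) : List Char := (List.range n).map (fun k => pvHexChar (N / 16 ^ k % 16))

theorem pv_hexLE_zero (n : Nat) : pvHexLE 0 n = List.replicate n '0' := by
  unfold pvHexLE
  have h : ∀ k : Nat, k ∈ List.range n → pvHexChar (0 / 16 ^ k % 16) = '0' := by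
    intro k _; rw [Nat.zero_div]; decide
  calc (List.range n).map (fun k => pvHexChar (0 / 16 ^ k % 16))
      = (List.range n).map (fun _ => '0') := List.map_congr_left h
    _ = List.replicate n '0' := by simp [List.map_const']

theorem pv_hexLE_pad : ∀ (n N : Nat), N < 16 ^ n →
    pvHexLE N n = pvHexDigits N ++ List.replicate (n - (pvHexDigits N).length) '0' := by
  intro n
  induction n with
  | zero =>
      intro N hN
      have : N = 0 := by omega
      subst this
      simp [pvHexLE, pvHexDigits]
  | succ n ih =>
      intro N hN
      by_cases hN0 : N = 0
      · subst hN0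
        rw [pv_hexLE_zero]
        simp [pvHexDigits]
      · have hdig : pvHexDigits N = pvHexChar (N % 16) :: pvHexDigits (N / 16) := by
          rw [pvHexDigits]; simp [hN0]
        have hstep : pvHexLE N (n + 1) = pvHexChar (N % 16) :: pvHexLE (N / 16) n := by
          unfold pvHexLE
          rw [List.range_succ_eq_map, List.map_cons, List.map_map]
          congr 1
          · norm_num
          · refine List.map_congr_left ?_
            intro k _
            simp only [Function.comp, Nat.succ_eq_add_one]
            congr 2
            rw [pow_succ']
            rw [← Nat.div_div_eq_div_mul]
        have hN16 : N / 16 < 16 ^ n := by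
          rw [Nat.div_lt_iff_lt_mul (by norm_num)]
          calc N < 16 ^ (n + 1) := hN
            _ = 16 ^ n * 16 := by rw [pow_succ]
        rw [hstep, hdig, ih (N / 16) hN16, List.cons_append, List.length_cons]
        have harith : n + 1 - ((pvHexDigits (N / 16)).length + 1)
            = n - (pvHexDigits (N / 16)).length := by omega
        rw [harith]

-- the digit list renders exactly as the zero-padded f-string
theorem pv_fmt_digits (N n : Nat) (h : N < 16 ^ n) :
    (if (pvHexLE N n).isEmpty = true then "0" else String.ofList (pvHexLE N n).reverse)
      = pvHexFmt ((N : Nat) : Int) ((n : Nat) : Int) := by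
  unfold pvHexFmt
  simp only [Int.toNat_natCast]
  by_cases hn0 : n = 0
  · subst hn0
    have hN0 : N = 0 := by
      have h1 : N < 1 := by simpa using h
      omega
    subst hN0
    simp [pvHexLE]
  · have hne : ¬ (pvHexLE N n).isEmpty = true := by
      unfold pvHexLE
      simp [hn0]
    rw [if_neg hne]
    by_cases hN0 : N = 0
    · subst hN0
      rw [pv_hexLE_zero, List.reverse_replicate, if_pos rfl]
      have hrep : List.replicate (n - 1) '0' ++ ['0'] = List.replicate n '0' := by
        rw [← List.replicate_succ']
        congr 1
        omega
      simp only [List.length_singleton, List.reverse_singleton]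
      rw [hrep]
    · rw [if_neg hN0]
      congr 1
      rw [pv_hexLE_pad n N h, List.reverse_append, List.reverse_replicate]

-- B's port equals pvHexFmt of the common value
theorem pv_B_eq (bn : Nat) (l : List Int) :
    pack_kernel_hex_alt l (bn : Int)
      = pvHexFmt (pvVal bn l) (PySem.Int.floordiv ((l.length : Int) * (bn : Int) + 3) 4) := by
  obtain ⟨N, hvN⟩ := Int.eq_ofNat_of_zero_le (pvVal_nonneg bn l)
  have hNL : N < 2 ^ (l.length * bn) := by
    have h' := pvVal_lt bn l
    rw [hvN] at h'
    exact_mod_cast h'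
  have hnh : PySem.Int.floordiv ((l.length : Int) * (bn : Int) + 3) 4
      = (((l.length * bn + 3) / 4 : Nat) : Int) := by
    have hc : ((l.length : Int) * (bn : Int) + 3) = ((l.length * bn + 3 : Nat) : Int) := by
      push_cast; ring
    rw [hc]
    exact_mod_cast PySem.Int.floordiv_natCast (l.length * bn + 3) 4
  have hN16 : N < 16 ^ ((l.length * bn + 3) / 4) := by
    calc N < 2 ^ (l.length * bn) := hNL
      _ ≤ 2 ^ (4 * ((l.length * bn + 3) / 4)) := Nat.pow_le_pow_right (by norm_num) (by omega)
      _ = 16 ^ ((l.length * bn + 3) / 4) := by rw [pow_mul]; norm_num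
  simp only [pack_kernel_hex_alt]
  rw [pv_bits bn l, hvN, Int.toNat_natCast, hnh]
  have hrange : PySem.List.pyRange 0 ((((l.length * bn + 3) / 4 : Nat) : Nat) : Int) 1
      = (List.range ((l.length * bn + 3) / 4)).map (fun k => ((k : Nat) : Int)) := by
    rw [PySem.List.pyRange_one]
    simp only [sub_zero, Int.toNat_natCast, zero_add]
  rw [hrange, List.foldl_map]
  have hdig : (List.range ((l.length * bn + 3) / 4)).foldl
      (fun digits k => digits ++
        ["0123456789ABCDEF".toList.getD
          ((PySem.List.pyRange 0 4 1).foldl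
            (fun nib j =>
              if 4 * ((k : Nat) : Int) + j
                  < ((((List.range (l.length * bn)).map (pvBit N)).length : Nat) : Int)
              then nib + PySem.List.pyGetD ((List.range (l.length * bn)).map (pvBit N))
                    (4 * ((k : Nat) : Int) + j) 0 * 2 ^ j.toNat
              else nib)
            0).toNat '?'])
      []
      = pvHexLE N ((l.length * bn + 3) / 4) := by
    rw [PySem.List.foldl_append_singleton_eq_map, List.nil_append]
    unfold pvHexLE
    refine List.map_congr_left ?_
    intro k _
    rw [pv_nib (l.length * bn) N hNL k, Int.toNat_natCast]
    exact pv_hexchar_eq _ (Nat.mod_lt _ (by norm_num))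
  rw [hdig]
  exact pv_fmt_digits N ((l.length * bn + 3) / 4) hN16

-- ===== VERDICT (by name: the statement is the Claim_ definition above) =====
theorem pack_kernel_hex_spec : Claim_equal_pack_kernel_hex := by
  intro kernel_vals bits_per_weight _ hpre
  obtain ⟨bn, rfl⟩ : ∃ bn : Nat, bits_per_weight = (bn : Int) :=
    ⟨bits_per_weight.toNat, (Int.toNat_of_nonneg hpre).symm⟩
  unfold Spec_pack_kernel_hex
  rw [pv_A_eq, pv_B_eq]
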